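-- pv_equiv track=rewrite | github.com/pperkovich1/Romero_VAE_DCA | utils.py | trim_msa
-- ===== SOURCE A (Python) =====
-- def trim_msa(msa):
--     '''Trims an MSA of empty(gap-only) columns.
--     Assumes MSA is in format:
--     [[seq1],
--     [seq2],
--     ...,
--     [seqN]]
--     where [seq] is a list of characters.
--     '''
--     msa_seqs = list(zip(*msa))
--     msa_seqs_trimmed = []
--     for i,col in enumerate(msa_seqs):
--         types = set(col)
--         if len(types) == 1 and ('-' in types):
--             pass
--         else:
--             msa_seqs_trimmed.append(col)
--     return list(zip(*msa_seqs_trimmed))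
-- ===== SOURCE B (Python) =====
-- def trim_msa(msa):
--     '''Trims an MSA of empty(gap-only) columns.'''
--     if not msa:
--         return []
--     ncols = min(len(r) for r in msa)
--     keep = [j for j in range(ncols) if any(row[j] != '-' for row in msa)]
--     if not keep:
--         return []
--     return [tuple(row[j] for j in keep) for row in msa]
-- ===== Notes on version B (the rewrite author's own statement) =====
-- stated objective: alternative
-- what changed: Replaces the double zip-transpose with an index table: compute the kept column indices once and rebuild each row by direct indexing, never materialising the transposed MSA.
import Mathlib
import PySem

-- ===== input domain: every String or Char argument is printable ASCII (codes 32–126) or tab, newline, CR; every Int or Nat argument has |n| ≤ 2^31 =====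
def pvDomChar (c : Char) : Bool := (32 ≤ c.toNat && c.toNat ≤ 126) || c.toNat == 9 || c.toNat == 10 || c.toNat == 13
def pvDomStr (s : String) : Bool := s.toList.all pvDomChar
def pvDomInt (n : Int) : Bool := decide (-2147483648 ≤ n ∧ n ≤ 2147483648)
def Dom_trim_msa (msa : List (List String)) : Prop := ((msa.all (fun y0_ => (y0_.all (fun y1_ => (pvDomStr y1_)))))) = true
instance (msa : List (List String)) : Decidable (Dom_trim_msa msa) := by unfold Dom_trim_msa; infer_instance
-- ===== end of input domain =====

-- B removes the gap-only columns by computing an index table of kept columns and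
-- rebuilding each row by direct indexing, instead of A's double zip-transpose
-- (objective: alternative decomposition, same asymptotic cost).

-- ===== PORT A =====
-- zip(*rows): columns j = 0 .. (min row length) - 1, column j = [row[j] for row in rows]
def pvMinLen (rows : List (List String)) : Nat :=
  match rows with
  | [] => 0
  | r :: rs => rs.foldl (fun m s => min m s.length) r.length

def pvZipStar (rows : List (List String)) : List (List String) :=
  (List.range (pvMinLen rows)).map (fun j => rows.map (fun r => r.getD j ""))

def trim_msa (msa : List (List String)) : List (List String) :=
  let msa_seqs := pvZipStar msa
  let msa_seqs_trimmed := msa_seqs.foldl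
    (fun acc col =>
      let types := PySem.Set.ofList col
      if types.length = 1 ∧ "-" ∈ types then acc else acc ++ [col]) []
  pvZipStar msa_seqs_trimmed

-- ===== PORT B =====
def trim_msa_alt (msa : List (List String)) : List (List String) :=
  match msa with
  | [] => []
  | r :: rs =>
    let ncols := rs.foldl (fun m s => min m s.length) r.length
    let keep := (List.range ncols).filter
      (fun j => (r :: rs).any (fun row => row.getD j "" != "-"))
    if keep = [] then []
    else (r :: rs).map (fun row => keep.map (fun j => row.getD j ""))

-- ===== PRECONDITION & SPEC =====
def Spec_trim_msa (msa : List (List String)) (out : List (List String)) : Prop := out = trim_msa_alt msa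
instance (msa : List (List String)) (out : List (List String)) : Decidable (Spec_trim_msa msa out) := by unfold Spec_trim_msa; infer_instance

-- ===== CLAIM (what is proved, stated in full; the proofs are below) =====
def Claim_equal_trim_msa : Prop := ∀ (msa : List (List String)), Dom_trim_msa msa → Spec_trim_msa msa (trim_msa msa)

-- ===== LEMMAS AND PROOFS =====

-- A's set-based "gap-only column" test is "every entry is '-'" (columns are nonempty).
theorem pv_allgap_iff (l : List String) (hne : l ≠ []) :
    ((PySem.Set.ofList l).length = 1 ∧ "-" ∈ PySem.Set.ofList l) ↔ ∀ x ∈ l, x = "-" := by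
  constructor
  · rintro ⟨hlen, hmem⟩ x hx
    obtain ⟨y, hy⟩ : ∃ y, PySem.Set.ofList l = [y] := by
      match h : PySem.Set.ofList l with
      | [] => simp [h] at hlen
      | [y] => exact ⟨y, rfl⟩
      | y :: z :: t => simp [h] at hlen
    have hx' : x ∈ PySem.Set.ofList l := (PySem.Set.mem_ofList l x).mpr hx
    rw [hy] at hx' hmem
    simp only [List.mem_singleton] at hx' hmem
    rw [hx', ← hmem]
  · intro hall
    obtain ⟨a, t, rfl⟩ := List.exists_cons_of_ne_nil hne
    have ha : a = "-" := hall a (by simp)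
    have hdis : (PySem.Set.ofList t).discard a = [] := by
      apply List.eq_nil_iff_forall_not_mem.mpr
      intro y hy
      have h1 := (PySem.Set.mem_discard _ a y).mp hy
      have hy' := (PySem.Set.mem_ofList t y).mp h1.1
      exact h1.2 (by rw [hall y (by simp [hy']), ha])
    rw [PySem.Set.ofList_cons, hdis, ha]
    simp

-- the accumulator loop of A is a filter
theorem pv_loop_filter (P : List String → Prop) [DecidablePred P] (l acc : List (List String)) :
    l.foldl (fun acc col => if P col then acc else acc ++ [col]) acc
      = acc ++ l.filter (fun col => !decide (P col)) := by
  have h : (fun (acc : List (List String)) col => if P col then acc else acc ++ [col])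
      = (fun acc col => if (fun c => !decide (P c)) col then acc ++ [id col] else acc) := by
    funext a c; by_cases hc : P c <;> simp [hc]
  rw [h]
  have := PySem.List.foldl_append_if (fun c : List String => !decide (P c)) id l acc
  simpa using this

theorem pv_minlen_const (m : Nat) (L : List (List String)) (h : ∀ s ∈ L, s.length = m) :
    L.foldl (fun a s => min a s.length) m = m := by
  induction L with
  | nil => rfl
  | cons x xs ih =>
    simp only [List.foldl_cons, h x (by simp)]
    rw [min_self]
    exact ih (fun s hs => h s (by simp [hs]))

theorem trim_msa_spec_aux (msa : List (List String)) : trim_msa msa = trim_msa_alt msa := by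
  match msa with
  | [] => rfl
  | r :: rs =>
    simp only [trim_msa, trim_msa_alt]
    set n := pvMinLen (r :: rs) with hn
    have hn' : rs.foldl (fun m s => min m s.length) r.length = n := rfl
    set colAt : Nat → List String := fun j => (r :: rs).map (fun row => row.getD j "") with hcol
    have hzip : pvZipStar (r :: rs) = (List.range n).map colAt := rfl
    rw [hzip, hn', pv_loop_filter, List.nil_append, List.filter_map]
    -- the two filter predicates agree pointwise
    have hpred : ∀ j, ((fun col => !decide ((PySem.Set.ofList col).length = 1 ∧ "-" ∈ PySem.Set.ofList col)) ∘ colAt) j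
        = (r :: rs).any (fun row => row.getD j "" != "-") := by
      intro j
      have hne : colAt j ≠ [] := by simp [hcol]
      simp only [Function.comp_apply]
      by_cases hall : ∀ x ∈ colAt j, x = "-"
      · have h1 : (!decide ((PySem.Set.ofList (colAt j)).length = 1 ∧ "-" ∈ PySem.Set.ofList (colAt j))) = false := by
          simp [(pv_allgap_iff _ hne).mpr hall]
        rw [h1]; symm
        simp only [List.any_eq_false, bne_iff_ne, ne_eq, not_not]
        intro row hrow
        exact hall _ (by rw [hcol]; exact List.mem_map_of_mem hrow)
      · have h1 : (!decide ((PySem.Set.ofList (colAt j)).length = 1 ∧ "-" ∈ PySem.Set.ofList (colAt j))) = true := by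
          rw [Bool.not_eq_true', decide_eq_false_iff_not]
          exact (pv_allgap_iff _ hne).not.mpr hall
        rw [h1]; symm
        simp only [List.any_eq_true, bne_iff_ne, ne_eq]
        push Not at hall
        obtain ⟨x, hx, hxne⟩ := hall
        rw [hcol] at hx
        simp only [List.mem_map] at hx
        obtain ⟨row, hrow, rfl⟩ := hx
        exact ⟨row, hrow, hxne⟩
    have hfil : (List.range n).filter ((fun col => !decide ((PySem.Set.ofList col).length = 1 ∧ "-" ∈ PySem.Set.ofList col)) ∘ colAt)
        = (List.range n).filter (fun j => (r :: rs).any (fun row => row.getD j "" != "-")) :=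
      List.filter_congr (fun j _ => hpred j)
    rw [hfil]
    set keep := (List.range n).filter (fun j => (r :: rs).any (fun row => row.getD j "" != "-")) with hkeep
    by_cases hk : keep = []
    · simp [hk, pvZipStar, pvMinLen]
    · rw [if_neg hk]
      obtain ⟨k, ks, hkk⟩ := List.exists_cons_of_ne_nil hk
      set m := (r :: rs).length with hm
      have hlen : ∀ s ∈ keep.map colAt, s.length = m := by
        intro s hs
        simp only [List.mem_map] at hs
        obtain ⟨j, _, rfl⟩ := hs
        simp [hcol, hm]
      have hminlen : pvMinLen (keep.map colAt) = m := by
        rw [hkk]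
        simp only [List.map_cons, pvMinLen]
        have hkl : (colAt k).length = m := hlen _ (by rw [hkk]; simp)
        rw [hkl]
        exact pv_minlen_const m (ks.map colAt)
          (fun s hs => hlen s (by rw [hkk]; simp at hs ⊢; tauto))
      have hzs : pvZipStar (keep.map colAt)
          = (List.range m).map (fun i => (keep.map colAt).map (fun c => c.getD i "")) := by
        rw [pvZipStar, hminlen]
      rw [hzs]
      apply List.ext_getElem
      · simp [hm]
      · intro i h1 h2
        have hi : i < (r :: rs).length := by simpa [hm] using h1
        rw [List.getElem_map, List.getElem_map, List.getElem_range, List.map_map]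
        apply List.map_congr_left
        intro j hj
        simp only [Function.comp_apply]
        show (List.map (fun row => row.getD j "") (r :: rs)).getD i "" = (r :: rs)[i].getD j ""
        have hic : i < (List.map (fun row => row.getD j "") (r :: rs)).length := by
          simpa using hi
        rw [List.getD_eq_getElem _ _ hic, List.getElem_map]

-- ===== VERDICT (by name: the statement is the Claim_ definition above) =====
theorem trim_msa_spec : Claim_equal_trim_msa := by
  intro msa _
  exact trim_msa_spec_aux msa
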